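-- pv_equiv track=rewrite | github.com/lapig-ufg/tiles | app/api/viewport.py | _get_static_order
-- ===== SOURCE A (Python) =====
-- from typing import List, Dict, Any
--
-- def _get_static_order(years: List[int], current_year: int) -> List[int]:
--     """Ordena anos para visualização estática"""
--     if current_year not in years:
--         return sorted(years, reverse=True)
--
--     result = [current_year]
--
--     # Adiciona anos próximos (±5 anos)
--     for delta in range(1, 6):
--         if current_year - delta in years:
--             result.append(current_year - delta)
--         if current_year + delta in years:
--             result.append(current_year + delta)
--
--     # Adiciona resto
--     for year in sorted(years, reverse=True):
--         if year not in result: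
--             result.append(year)
--
--     return result
-- ===== SOURCE B (Python) =====
-- from typing import List
--
-- def _get_static_order(years: List[int], current_year: int) -> List[int]:
--     """Ordena anos para visualização estática"""
--     if current_year not in years:
--         return sorted(years, reverse=True)
--
--     def key(y):
--         d = abs(y - current_year)
--         return (6, -y) if d > 5 else (d, y)
--
--     result = []
--     for y in sorted(years, key=key):
--         if y not in result:
--             result.append(y)
--     return result
-- ===== Notes on version B (the rewrite author's own statement) =====
-- stated objective: alternative
-- what changed: Replaces A's explicit delta-by-delta scan plus membership-checked residual pass with a single key-based sort (current year first, ±5 neighbours by distance then ascending year, far years descending) followed by one first-occurrence dedup pass.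
import Mathlib
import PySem

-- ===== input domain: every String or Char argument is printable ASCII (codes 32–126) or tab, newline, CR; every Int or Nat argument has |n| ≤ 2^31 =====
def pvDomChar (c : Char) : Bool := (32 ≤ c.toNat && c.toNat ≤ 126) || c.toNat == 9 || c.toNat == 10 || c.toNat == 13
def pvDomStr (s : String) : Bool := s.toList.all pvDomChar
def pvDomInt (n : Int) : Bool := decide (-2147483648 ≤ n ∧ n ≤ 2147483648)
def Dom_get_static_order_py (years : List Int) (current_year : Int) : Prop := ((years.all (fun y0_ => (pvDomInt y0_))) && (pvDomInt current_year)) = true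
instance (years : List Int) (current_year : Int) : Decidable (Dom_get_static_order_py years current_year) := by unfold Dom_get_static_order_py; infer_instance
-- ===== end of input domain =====

-- B replaces A's delta-by-delta scanning with one key-based sort plus a single first-occurrence
-- dedup pass (objective: alternative algorithm of similar cost).

-- ===== PORT A =====
def get_static_order_py (years : List Int) (current_year : Int) : List Int :=
  if !(years.contains current_year) then
    PySem.List.sorted years (fun y => y) true
  else
    let result := [current_year]
    let result := (PySem.List.pyRange 1 6).foldl (fun result delta =>
      let result := if years.contains (current_year - delta) then result ++ [current_year - delta] else result
      if years.contains (current_year + delta) then result ++ [current_year + delta] else result) result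
    (PySem.List.sorted years (fun y => y) true).foldl (fun result year =>
      if result.contains year then result else result ++ [year]) result

-- ===== PORT B =====
-- Python's abs(n) on int, step for step (exact).
def pvAbs (n : Int) : Int := if n < 0 then -n else n

def get_static_order_py_alt (years : List Int) (current_year : Int) : List Int :=
  if !(years.contains current_year) then
    PySem.List.sorted years (fun y => y) true
  else
    -- key(y) = (6, -y) if abs(y - current_year) > 5 else (abs(y - current_year), y); tuple key → sorted2
    let ordered := PySem.List.sorted2 years
      (fun y => if pvAbs (y - current_year) > 5 then (6 : Int) else pvAbs (y - current_year))
      (fun y => if pvAbs (y - current_year) > 5 then -y else y)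
    ordered.foldl (fun result y => if result.contains y then result else result ++ [y]) []

-- ===== PRECONDITION & SPEC =====
def Spec_get_static_order_py (years : List Int) (current_year : Int) (out : List Int) : Prop := out = get_static_order_py_alt years current_year
instance (years : List Int) (current_year : Int) (out : List Int) : Decidable (Spec_get_static_order_py years current_year out) := by unfold Spec_get_static_order_py; infer_instance

-- ===== CLAIM (what is proved, stated in full; the proofs are below) =====
def Claim_equal_get_static_order_py : Prop := ∀ (years : List Int) (current_year : Int), Dom_get_static_order_py years current_year → Spec_get_static_order_py years current_year (get_static_order_py years current_year)

-- ===== LEMMAS AND PROOFS =====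

-- Encoding of B's sort key as a single integer (order-isomorphic on Dom-bounded inputs).
def pvEnc (cy y : Int) : Int :=
  if pvAbs (y - cy) > 5 then 6 * 8589934592 - y else pvAbs (y - cy) * 8589934592 + y

-- The value computed by A's delta loop: candidates in A's visiting order, filtered by membership.
def pvNear (years : List Int) (cy : Int) : List Int :=
  (cy :: ([1, 2, 3, 4, 5] : List Int).flatMap (fun d => [cy - d, cy + d])).filter
    (fun t => years.contains t)

-- First-occurrence dedup (structural form of the 'if y not in result: result.append(y)' loop).
def pvDedup (seen : List Int) : List Int → List Int
  | [] => []
  | y :: ys => if seen.contains y then pvDedup seen ys else y :: pvDedup (y :: seen) ys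


theorem pvDedup_congr (S s1 s2 : List Int) (h : ∀ z, z ∈ s1 ↔ z ∈ s2) :
    pvDedup s1 S = pvDedup s2 S := by
  induction S generalizing s1 s2 with
  | nil => rfl
  | cons y ys ih =>
    have hy : s1.contains y = s2.contains y := by
      simp only [List.contains_eq_mem, h]
    rw [pvDedup, pvDedup, hy]
    split
    · exact ih s1 s2 h
    · rw [ih (y :: s1) (y :: s2) (fun z => by simp [h])]

theorem pvDedup_mem (S : List Int) (seen : List Int) (x : Int) :
    x ∈ pvDedup seen S ↔ x ∈ S ∧ x ∉ seen := by
  induction S generalizing seen with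
  | nil => simp [pvDedup]
  | cons y ys ih =>
    rw [pvDedup]
    split
    · rename_i h
      simp only [List.contains_eq_mem, decide_eq_true_eq] at h
      rw [ih, List.mem_cons]
      constructor
      · rintro ⟨h1, h2⟩
        exact ⟨Or.inr h1, h2⟩
      · rintro ⟨h1 | h1, h2⟩
        · exact absurd (h1 ▸ h) h2
        · exact ⟨h1, h2⟩
    · rename_i h
      simp only [List.contains_eq_mem, decide_eq_true_eq] at h
      rw [List.mem_cons, ih, List.mem_cons]
      by_cases hx : x = y
      · subst hx; simp [h]
      · simp only [hx, false_or, List.mem_cons]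

theorem pvDedup_nodup (S : List Int) (seen : List Int) : (pvDedup seen S).Nodup := by
  induction S generalizing seen with
  | nil => simp [pvDedup]
  | cons y ys ih =>
    rw [pvDedup]
    split
    · exact ih seen
    · rw [List.nodup_cons]
      refine ⟨fun h => ?_, ih (y :: seen)⟩
      rw [pvDedup_mem] at h
      simp at h

theorem pvDedup_pairwise {R : Int → Int → Prop} (S : List Int) (seen : List Int)
    (h : S.Pairwise R) : (pvDedup seen S).Pairwise R := by
  induction S generalizing seen with
  | nil => simp [pvDedup]
  | cons y ys ih =>
    rw [List.pairwise_cons] at h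
    rw [pvDedup]
    split
    · exact ih seen h.2
    · rw [List.pairwise_cons]
      refine ⟨fun z hz => ?_, ih (y :: seen) h.2⟩
      rw [pvDedup_mem] at hz
      exact h.1 z hz.1

theorem foldl_dedup (S acc : List Int) :
    S.foldl (fun r y => if r.contains y then r else r ++ [y]) acc
      = acc ++ pvDedup acc S := by
  induction S generalizing acc with
  | nil => simp [pvDedup]
  | cons y S ih =>
    rw [List.foldl_cons, pvDedup]
    by_cases h : acc.contains y
    · rw [if_pos h, if_pos h]
      exact ih acc
    · rw [if_neg h, if_neg h, ih (acc ++ [y]),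
        pvDedup_congr S (acc ++ [y]) (y :: acc) (fun z => by simp [or_comm])]
      simp

theorem pvEnc_near (cy y : Int) (h : pvAbs (y - cy) ≤ 5) :
    pvEnc cy y = pvAbs (y - cy) * 8589934592 + y := by
  rw [pvEnc, if_neg (by omega)]

theorem pvEnc_far (cy y : Int) (h : pvAbs (y - cy) > 5) :
    pvEnc cy y = 6 * 8589934592 - y := by
  rw [pvEnc, if_pos h]

-- pvEnc is strictly monotone in B's tuple key, for Dom-bounded inputs.
theorem before_eq (cy u v : Int)
    (hu : -2147483648 ≤ u ∧ u ≤ 2147483648)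
    (hv : -2147483648 ≤ v ∧ v ≤ 2147483648) :
    ((if pvAbs (u - cy) > 5 then (6:Int) else pvAbs (u - cy)) < (if pvAbs (v - cy) > 5 then (6:Int) else pvAbs (v - cy))
      ∨ (¬ (if pvAbs (v - cy) > 5 then (6:Int) else pvAbs (v - cy)) < (if pvAbs (u - cy) > 5 then (6:Int) else pvAbs (u - cy))
          ∧ (if pvAbs (u - cy) > 5 then -u else u) < (if pvAbs (v - cy) > 5 then -v else v)))
      ↔ pvEnc cy u < pvEnc cy v := by
  simp only [pvEnc, pvAbs]
  split_ifs <;> omega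

theorem insertBy_congr (b1 b2 : Int → Int → Bool) (x : Int) (ys : List Int)
    (h : ∀ u ∈ x :: ys, ∀ v ∈ x :: ys, b1 u v = b2 u v) :
    PySem.List.insertBy b1 x ys = PySem.List.insertBy b2 x ys := by
  induction ys with
  | nil => rfl
  | cons y ys ih =>
    rw [PySem.List.insertBy, PySem.List.insertBy,
      h x (by simp) y (by simp)]
    split
    · rfl
    · rw [ih (fun u hu v hv => ?_)]
      · rcases List.mem_cons.1 hu with hu | hu <;>
        rcases List.mem_cons.1 hv with hv | hv <;>
        exact h u (by simp [hu]) v (by simp [hv])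

theorem foldl_insertBy_congr (b1 b2 : Int → Int → Bool) (xs acc : List Int)
    (h : ∀ u, (u ∈ acc ∨ u ∈ xs) → ∀ v, (v ∈ acc ∨ v ∈ xs) → b1 u v = b2 u v) :
    xs.foldl (fun acc x => PySem.List.insertBy b1 x acc) acc
      = xs.foldl (fun acc x => PySem.List.insertBy b2 x acc) acc := by
  induction xs generalizing acc with
  | nil => rfl
  | cons x xs ih =>
    rw [List.foldl_cons, List.foldl_cons,
      insertBy_congr b1 b2 x acc (fun u hu v hv => ?_), ih]
    · intro u hu v hv
      apply h
      · rcases hu with hu | hu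
        · rcases (PySem.List.insertBy_mem_iff b2 x u acc).1 hu with hu | hu
          · exact Or.inr (by simp [hu])
          · exact Or.inl hu
        · exact Or.inr (by simp [hu])
      · rcases hv with hv | hv
        · rcases (PySem.List.insertBy_mem_iff b2 x v acc).1 hv with hv | hv
          · exact Or.inr (by simp [hv])
          · exact Or.inl hv
        · exact Or.inr (by simp [hv])
    · rcases List.mem_cons.1 hu with hu | hu
      · exact h u (Or.inr (by simp [hu])) v
          (by rcases List.mem_cons.1 hv with hv | hv
              · exact Or.inr (by simp [hv])
              · exact Or.inl hv)
      · exact h u (Or.inl hu) v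
          (by rcases List.mem_cons.1 hv with hv | hv
              · exact Or.inr (by simp [hv])
              · exact Or.inl hv)

theorem sorted2_eq_sorted_enc (years : List Int) (cy : Int)
    (hb : ∀ y ∈ years, -2147483648 ≤ y ∧ y ≤ 2147483648) :
    PySem.List.sorted2 years
      (fun y => if pvAbs (y - cy) > 5 then (6 : Int) else pvAbs (y - cy))
      (fun y => if pvAbs (y - cy) > 5 then -y else y)
      = PySem.List.sorted years (pvEnc cy) false := by
  rw [PySem.List.sorted2, PySem.List.sorted_eq_foldl_insertBy]
  simp only [Bool.false_eq_true, if_false]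
  apply foldl_insertBy_congr
  intro u hu v hv
  simp only [List.not_mem_nil, false_or] at hu hv
  rw [← decide_not, ← Bool.decide_and, ← Bool.decide_or, decide_eq_decide]
  exact before_eq cy u v (hb u hu) (hb v hv)

theorem pvCand_eq (cy : Int) :
    (cy :: ([1, 2, 3, 4, 5] : List Int).flatMap (fun d => [cy - d, cy + d]))
      = ([0, -1, 1, -2, 2, -3, 3, -4, 4, -5, 5] : List Int).map (fun i => cy + i) := by
  simp only [List.flatMap_cons, List.flatMap_nil, List.cons_append, List.nil_append,
    List.append_nil, List.map_cons, List.map_nil, List.cons.injEq, and_true]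
  and_intros <;> first | trivial | omega

theorem pvNear_mem (years : List Int) (cy x : Int) :
    x ∈ pvNear years cy ↔ x ∈ years ∧ pvAbs (x - cy) ≤ 5 := by
  simp only [pvNear, List.mem_filter, List.flatMap_cons, List.flatMap_nil, List.cons_append,
    List.nil_append, List.append_nil, List.mem_cons, List.not_mem_nil, or_false,
    List.contains_eq_mem, decide_eq_true_eq, pvAbs]
  constructor
  · rintro ⟨h1, h2⟩
    refine ⟨h2, ?_⟩
    split_ifs <;> omega
  · rintro ⟨h1, h2⟩
    refine ⟨?_, h1⟩
    split_ifs at h2 <;> omega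

theorem pvNear_nodup (years : List Int) (cy : Int) : (pvNear years cy).Nodup := by
  rw [pvNear, pvCand_eq]
  apply List.Nodup.filter
  exact (List.nodup_map_iff_inj_on (by decide)).2
    (fun i _ j _ h => by omega)

theorem pvNear_pairwise (years : List Int) (cy : Int) :
    (pvNear years cy).Pairwise (fun a b => pvEnc cy a < pvEnc cy b) := by
  rw [pvNear, pvCand_eq]
  apply List.Pairwise.filter
  rw [List.pairwise_map]
  refine List.Pairwise.imp_of_mem ?_
    (show List.Pairwise (fun i j : Int => pvAbs i * 8589934592 + i < pvAbs j * 8589934592 + j)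
      [0, -1, 1, -2, 2, -3, 3, -4, 4, -5, 5] from by decide)
  intro a b ha hb hR
  have hea : cy + a - cy = a := by ring
  have heb : cy + b - cy = b := by ring
  have ha5 : pvAbs a ≤ 5 := by
    simp only [List.mem_cons, List.not_mem_nil, or_false] at ha
    simp only [pvAbs]; split_ifs <;> omega
  have hb5 : pvAbs b ≤ 5 := by
    simp only [List.mem_cons, List.not_mem_nil, or_false] at hb
    simp only [pvAbs]; split_ifs <;> omega
  rw [pvEnc_near cy (cy + a) (by rw [hea]; exact ha5),
    pvEnc_near cy (cy + b) (by rw [heb]; exact hb5), hea, heb]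
  omega

theorem pvEnc_inj (cy a b : Int)
    (ha : -2147483648 ≤ a ∧ a ≤ 2147483648)
    (hb : -2147483648 ≤ b ∧ b ≤ 2147483648)
    (h : pvEnc cy a = pvEnc cy b) : a = b := by
  simp only [pvEnc, pvAbs] at h
  split_ifs at h <;> omega

theorem A_near (years : List Int) (cy : Int) (hc : years.contains cy = true) :
    (PySem.List.pyRange 1 6).foldl (fun result delta =>
        if years.contains (cy + delta) = true then
          (if years.contains (cy - delta) = true then result ++ [cy - delta] else result) ++ [cy + delta]
        else if years.contains (cy - delta) = true then result ++ [cy - delta] else result)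
      [cy] = pvNear years cy := by
  rw [PySem.List.foldl_congr_mem (PySem.List.pyRange 1 6)
    (fun result delta =>
        if years.contains (cy + delta) = true then
          (if years.contains (cy - delta) = true then result ++ [cy - delta] else result) ++ [cy + delta]
        else if years.contains (cy - delta) = true then result ++ [cy - delta] else result)
    (fun r d => r ++ ([cy - d, cy + d].filter (fun t => years.contains t)))
    [cy]
    (fun r d _ => by
      simp only [List.contains_eq_mem, List.filter_cons, List.filter_nil, decide_eq_true_eq]
      split_ifs <;> simp)]
  rw [PySem.List.foldl_append_eq_flatMap]
  simp only [pvNear, List.filter_cons, hc, List.filter_flatMap, List.singleton_append]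
  rw [show PySem.List.pyRange 1 6 = [1, 2, 3, 4, 5] from by decide]
  simp

-- ===== VERDICT (by name: the statement is the Claim_ definition above) =====
theorem get_static_order_py_spec : Claim_equal_get_static_order_py := by
  intro years cy hdom
  simp only [Dom_get_static_order_py, Bool.and_eq_true, List.all_eq_true, pvDomInt,
    decide_eq_true_eq] at hdom
  have hbnd : ∀ y ∈ years, -2147483648 ≤ y ∧ y ≤ 2147483648 := fun y hy => hdom.1 y hy
  show get_static_order_py years cy = get_static_order_py_alt years cy
  by_cases hc : years.contains cy
  · simp only [get_static_order_py, get_static_order_py_alt, hc, Bool.not_true,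
      Bool.false_eq_true, if_false]
    rw [A_near years cy hc, foldl_dedup, foldl_dedup,
      sorted2_eq_sorted_enc years cy hbnd, List.nil_append]
    -- uniqueness of the strictly pvEnc-sorted arrangement of the distinct elements
    set S := PySem.List.sorted years (fun y => y) true with hS
    have hcym : cy ∈ years := by
      rwa [List.contains_eq_mem, decide_eq_true_eq] at hc
    have mem1 : ∀ x, x ∈ pvNear years cy ++ pvDedup (pvNear years cy) S ↔ x ∈ years := by
      intro x
      simp only [List.mem_append, pvDedup_mem, pvNear_mem, hS, PySem.List.mem_sorted]
      constructor
      · rintro (⟨h1, _⟩ | ⟨h1, _⟩) <;> exact h1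
      · intro h1
        by_cases h5 : pvAbs (x - cy) ≤ 5
        · exact Or.inl ⟨h1, h5⟩
        · exact Or.inr ⟨h1, fun hm => h5 hm.2⟩
    have mem2 : ∀ x, x ∈ pvDedup [] (PySem.List.sorted years (pvEnc cy) false) ↔ x ∈ years := by
      intro x
      simp [pvDedup_mem, PySem.List.mem_sorted]
    have nodup1 : (pvNear years cy ++ pvDedup (pvNear years cy) S).Nodup :=
      List.Nodup.append (pvNear_nodup years cy) (pvDedup_nodup S (pvNear years cy))
        (fun a ha hd => ((pvDedup_mem S (pvNear years cy) a).1 hd).2 ha)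
    have nodup2 : (pvDedup [] (PySem.List.sorted years (pvEnc cy) false)).Nodup :=
      pvDedup_nodup _ _
    have far_facts : ∀ a ∈ pvDedup (pvNear years cy) S, a ∈ years ∧ pvAbs (a - cy) > 5 := by
      intro a ha
      obtain ⟨haS, hanear⟩ := (pvDedup_mem S (pvNear years cy) a).1 ha
      have hay : a ∈ years := by rwa [hS, PySem.List.mem_sorted] at haS
      refine ⟨hay, ?_⟩
      by_contra h5
      exact hanear ((pvNear_mem years cy a).2 ⟨hay, by omega⟩)
    have pairwise1 : (pvNear years cy ++ pvDedup (pvNear years cy) S).Pairwise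
        (fun a b => pvEnc cy a < pvEnc cy b) := by
      rw [List.pairwise_append]
      refine ⟨pvNear_pairwise years cy, ?_, ?_⟩
      · have base : S.Pairwise (fun a b : Int => b ≤ a) :=
          PySem.List.sorted_pairwise_rev years (fun y => y)
        have d1 := pvDedup_pairwise S (pvNear years cy) base
        refine ((d1.and (pvDedup_nodup S (pvNear years cy))).imp_of_mem ?_)
        intro a b ha hbm hab
        obtain ⟨hay, ha5⟩ := far_facts a ha
        obtain ⟨hby, hb5⟩ := far_facts b hbm
        rw [pvEnc_far cy a ha5, pvEnc_far cy b hb5]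
        obtain ⟨hle, hne⟩ := hab
        have hne' : a ≠ b := hne
        omega
      · intro a ha b hbm
        obtain ⟨hay, ha5⟩ := (pvNear_mem years cy a).1 ha
        obtain ⟨hby, hb5⟩ := far_facts b hbm
        obtain ⟨ha1, ha2⟩ := hbnd a hay
        obtain ⟨hb1, hb2⟩ := hbnd b hby
        rw [pvEnc_near cy a ha5, pvEnc_far cy b hb5]
        omega
    have pairwise2 : (pvDedup [] (PySem.List.sorted years (pvEnc cy) false)).Pairwise
        (fun a b => pvEnc cy a ≤ pvEnc cy b) :=
      pvDedup_pairwise _ _ (PySem.List.sorted_pairwise years (pvEnc cy))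
    refine List.Perm.eq_of_pairwise (le := fun a b => pvEnc cy a ≤ pvEnc cy b) ?_
      (pairwise1.imp (fun h => le_of_lt h)) pairwise2
      ((List.perm_ext_iff_of_nodup nodup1 nodup2).2 (fun x => by rw [mem1, mem2]))
    intro a b ha hbm h1 h2
    exact pvEnc_inj cy a b (hbnd a ((mem1 a).1 ha)) (hbnd b ((mem2 b).1 hbm))
      (le_antisymm h1 h2)
  · rw [Bool.not_eq_true] at hc
    simp only [get_static_order_py, get_static_order_py_alt, hc, Bool.not_false, if_true]
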